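-- pv_equiv track=rewrite | github.com/JiSuMun/Algorithm-Study | W06/Shureeshu/84512_모음사전.py | solution
-- ===== SOURCE A (Python) =====
-- def solution(word):
--     answer = 0
--     order = {
--         'A' : 0,
--         'E' : 1,
--         'I' : 2,
--         'O' : 3,
--         'U' : 4,
--     }
--     word = ''.join([word, ' '*(5-len(word))])
--     for i, char in enumerate(word):
--         if char == ' ':
--             break
--         else:
--             answer += sum(5**i for i in range(5-i))*order[char] + 1
--     return answer
-- ===== SOURCE B (Python) =====
-- def solution(word):
--     # Build the whole vowel dictionary (all words of length 1..5 over AEIOU)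
--     # in dictionary order by DFS; the answer is the 1-based index of the part
--     # of the word before the first space (A never reads past a space), and 0
--     # for anything that is not in the dictionary.
--     dictionary = []
--
--     def dfs(prefix):
--         if prefix:
--             dictionary.append(prefix)
--         if len(prefix) < 5:
--             for c in "AEIOU":
--                 dfs(prefix + c)
--
--     dfs("")
--     key = word.split(' ')[0]
--     return dictionary.index(key) + 1 if key in dictionary else 0
-- ===== Notes on version B (the rewrite author's own statement) =====
-- stated objective: alternative
-- what changed: B replaces A's positional-arithmetic rank formula with explicit DFS generation of the full 3905-word vowel dictionary in order, returning the 1-based index of the part before the first space (0 if it is not a dictionary word).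
-- intended difference: On words whose all-vowel prefix before the first space is longer than 5 characters, A keeps counting past length 5 and returns rank(first 5 letters) plus one per extra letter (an artifact of its padding arithmetic), while B returns 0, the intended answer for a word that is not in the 1..5-letter vowel dictionary. — e.g. on solution("AAAAAA"): A returns 6, B returns 0
import Mathlib
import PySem

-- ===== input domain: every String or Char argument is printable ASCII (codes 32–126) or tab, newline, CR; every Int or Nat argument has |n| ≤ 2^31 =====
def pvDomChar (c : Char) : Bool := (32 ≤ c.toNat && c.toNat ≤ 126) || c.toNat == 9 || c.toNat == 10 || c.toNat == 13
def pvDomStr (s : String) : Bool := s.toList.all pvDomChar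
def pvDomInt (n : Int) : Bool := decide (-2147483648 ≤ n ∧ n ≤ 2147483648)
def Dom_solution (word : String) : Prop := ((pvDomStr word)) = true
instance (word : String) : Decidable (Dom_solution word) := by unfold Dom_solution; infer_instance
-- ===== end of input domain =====

-- B replaces A's positional-arithmetic rank with explicit DFS generation of the whole vowel
-- dictionary in order, returning the 1-based index of the part before the first space, 0 for
-- non-dictionary words (alternative decomposition; intended difference D_ on >5-letter prefixes).
set_option maxRecDepth 100000


-- ===== PORT A =====
-- order[char]; Python raises KeyError on other chars, which Pre_solution excludes
def vOrder (c : Char) : Int :=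
  if c = 'A' then 0 else if c = 'E' then 1 else if c = 'I' then 2
  else if c = 'O' then 3 else if c = 'U' then 4 else 0

-- sum(5**i for i in range(k))
def sumPow (k : Nat) : Int := (List.range k).foldl (fun s j => s + 5 ^ j) 0

-- the for-loop over enumerate(word) with its break at the first space
def aLoop : List Char → Nat → Int → Int
  | [], _, acc => acc
  | c :: rest, i, acc =>
      if c = ' ' then acc
      else aLoop rest (i + 1) (acc + sumPow (5 - i) * vOrder c + 1)

-- word = ''.join([word, ' '*(5-len(word))]) then the loop (Nat subtraction = Python's '' on negative)
def solCore (l : List Char) : Int :=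
  aLoop (l ++ List.replicate (5 - l.length) ' ') 0 0

def solution (word : String) : Int := solCore word.toList

-- ===== PORT B =====
def vowels : List Char := ['A', 'E', 'I', 'O', 'U']

-- dfs(prefix): append the non-empty prefix, then recurse on each vowel while len < 5
-- (fuel = 5 - len(prefix), so the structural recursion mirrors the Python DFS exactly)
def bDfs (pre : List Char) : Nat → List (List Char)
  | 0 => if pre = [] then [] else [pre]
  | n + 1 => (if pre = [] then [] else [pre]) ++ vowels.flatMap (fun c => bDfs (pre ++ [c]) n)

-- key = word.split(' ')[0] — the characters before the first space (exact for ASCII input);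
-- then: dictionary.index(key) + 1 if key in dictionary else 0
def solution_alt (word : String) : Int :=
  match PySem.List.index? (bDfs [] 5) (word.toList.takeWhile (fun c => c ≠ ' ')) with
  | some i => (i : Int) + 1
  | none => 0

-- ===== PRECONDITION & SPEC =====
-- Pre_ excludes exactly the inputs where A raises KeyError: some character before the
-- first space (A breaks there) is not one of 'AEIOU'.
def Pre_solution (word : String) : Prop :=
  ((word.toList.takeWhile (fun c => c ≠ ' ')).all (fun c => decide (c ∈ vowels))) = true
instance (word : String) : Decidable (Pre_solution word) := by unfold Pre_solution; infer_instance

def pvWitness_solution : String := "AEIOU"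

-- On words whose all-vowel prefix before the first space is longer than 5 characters, A keeps
-- counting past length 5 and returns rank(first 5 letters) plus one per extra letter (an artifact
-- of its padding arithmetic), while B returns 0, the intended answer for a word that is not in
-- the 1..5-letter vowel dictionary.
def D_solution (word : String) : Prop :=
  5 < word.toList.length ∧ ' ' ∉ word.toList.take 6
instance (word : String) : Decidable (D_solution word) := by unfold D_solution; infer_instance

def Spec_solution (word : String) (out : Int) : Prop := ¬ D_solution word → out = solution_alt word
instance (word : String) (out : Int) : Decidable (Spec_solution word out) := by unfold Spec_solution; infer_instance

def pvDiffWitness_solution : String := "AAAAAA"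
def pvDiffWitnessOut_solution : Int × Int := (6, 0)

-- ===== CLAIM (what is proved, stated in full; the proofs are below) =====
def Claim_unchanged_solution : Prop := ∀ (word : String), Dom_solution word → Pre_solution word → Spec_solution word (solution word)
def Claim_changed_solution : Prop := Dom_solution (pvDiffWitness_solution) ∧ Pre_solution (pvDiffWitness_solution) ∧ D_solution (pvDiffWitness_solution) ∧ solution (pvDiffWitness_solution) = pvDiffWitnessOut_solution.1 ∧ solution_alt (pvDiffWitness_solution) = pvDiffWitnessOut_solution.2 ∧ pvDiffWitnessOut_solution.1 ≠ pvDiffWitnessOut_solution.2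
def Claim_exact_solution : Prop := ∀ (word : String), Dom_solution word → Pre_solution word → D_solution word → solution word ≠ solution_alt word

-- ===== LEMMAS AND PROOFS =====

-- D_solution says exactly: the prefix before the first space is longer than 5 characters
theorem len_le_takeWhile_of_no_space (n : Nat) : ∀ (l : List Char), n ≤ l.length →
    ' ' ∉ l.take n → n ≤ (l.takeWhile (fun c => c ≠ ' ')).length := by
  induction n with
  | zero => intro l _ _; omega
  | succ m ih =>
    intro l hlen hns
    cases l with
    | nil => simp at hlen
    | cons c t =>
      have hc : ¬ (c = ' ') := by
        intro h; exact hns (by simp [List.take, h])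
      have ht : ' ' ∉ t.take m := by
        intro h; exact hns (by simp [List.take, h])
      have h2 := ih t (by simpa using hlen) ht
      simp [hc, decide_not] at h2 ⊢
      omega

theorem takeWhile_lt_of_space (n : Nat) : ∀ (l : List Char), ' ' ∈ l.take n →
    (l.takeWhile (fun c => c ≠ ' ')).length < n := by
  induction n with
  | zero => intro l h; simp at h
  | succ m ih =>
    intro l h
    cases l with
    | nil => simp at h
    | cons c t =>
      by_cases hc : c = ' '
      · simp [hc]
      · have ht : ' ' ∈ t.take m := by
          rcases List.mem_cons.mp (by simpa [List.take] using h) with h' | h'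
          · exact absurd h'.symm hc
          · exact h'
        have h2 := ih t ht
        simp [hc, decide_not] at h2 ⊢
        omega

theorem D_iff (word : String) :
    D_solution word ↔ 5 < (word.toList.takeWhile (fun c => c ≠ ' ')).length := by
  unfold D_solution
  constructor
  · rintro ⟨hlen, hns⟩
    have := len_le_takeWhile_of_no_space 6 word.toList (by omega) hns
    omega
  · intro h
    have hle : (word.toList.takeWhile (fun c => c ≠ ' ')).length ≤ word.toList.length :=
      (List.takeWhile_prefix _).length_le
    refine ⟨by omega, ?_⟩
    intro hmem
    have := takeWhile_lt_of_space 6 word.toList hmem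
    omega

-- A's loop never reads past the first space: padding with spaces or truncating at the
-- first space gives the same accumulator.
theorem aLoop_pad (k : Nat) (l : List Char) : ∀ (i : Nat) (acc : Int),
    aLoop (l ++ List.replicate k ' ') i acc = aLoop (l.takeWhile (fun c => c ≠ ' ')) i acc := by
  induction l with
  | nil =>
    intro i acc
    cases k <;> simp [aLoop, List.replicate]
  | cons c t ih =>
    intro i acc
    by_cases hc : c = ' '
    · simp [aLoop, hc]
    · simp [aLoop, hc, ih]

-- so A's result is a function of the prefix before the first space only
theorem solution_eq_prefix (word : String) :
    solution word = aLoop (word.toList.takeWhile (fun c => c ≠ ' ')) 0 0 :=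
  aLoop_pad (5 - word.toList.length) word.toList 0 0

-- and on an all-vowel list the padded loop equals the truncated loop as well
theorem solCore_eq_noSpace (l : List Char) (h : ∀ c ∈ l, c ∈ vowels) :
    solCore l = aLoop l 0 0 := by
  unfold solCore
  rw [aLoop_pad]
  congr 1
  refine List.takeWhile_eq_self_iff.mpr ?_
  intro c hc
  have := h c hc
  simp [vowels] at this
  rcases this with rfl | rfl | rfl | rfl | rfl <;> decide

-- every dictionary entry is a non-empty vowel string of length ≤ pre.length + n over pre
theorem bDfs_elem (n : Nat) : ∀ (pre l : List Char), l ∈ bDfs pre n →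
    l ≠ [] ∧ ∃ s, l = pre ++ s ∧ s.length ≤ n ∧ ∀ c ∈ s, c ∈ vowels := by
  induction n with
  | zero =>
    intro pre l hl
    unfold bDfs at hl
    by_cases hp : pre = [] <;> simp [hp] at hl
    subst hl
    exact ⟨hp, [], by simp⟩
  | succ m ih =>
    intro pre l hl
    unfold bDfs at hl
    rcases List.mem_append.mp hl with h | h
    · by_cases hp : pre = [] <;> simp [hp] at h
      subst h
      exact ⟨hp, [], by simp⟩
    · rcases List.mem_flatMap.mp h with ⟨v, hv, hmem⟩
      obtain ⟨hne, s, rfl, hslen, hs⟩ := ih (pre ++ [v]) l hmem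
      refine ⟨hne, v :: s, by simp, by simpa using hslen, ?_⟩
      intro c hc
      rcases List.mem_cons.mp hc with rfl | hc
      · exact hv
      · exact hs c hc

theorem not_mem_dict_long (l : List Char) (h : 5 < l.length) : l ∉ bDfs [] 5 := by
  intro hmem
  obtain ⟨-, s, rfl, hlen, -⟩ := bDfs_elem 5 [] _ hmem
  omega

theorem nil_not_mem_dict : ([] : List Char) ∉ bDfs [] 5 := by
  intro hmem
  exact (bDfs_elem 5 [] _ hmem).1 rfl

theorem self_mem_bDfs (n : Nat) (pre : List Char) (h : pre ≠ []) : pre ∈ bDfs pre n := by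
  cases n with
  | zero => simp [bDfs, h]
  | succ m => simp [bDfs, h]

theorem mem_bDfs (s : List Char) : ∀ (n : Nat) (pre : List Char), s ≠ [] → s.length ≤ n →
    (∀ c ∈ s, c ∈ vowels) → pre ++ s ∈ bDfs pre n := by
  induction s with
  | nil => intro n pre h; exact absurd rfl h
  | cons c t ih =>
    intro n pre _ hlen hv
    cases n with
    | zero => simp at hlen
    | succ m =>
      have hc : c ∈ vowels := hv c (by simp)
      have hrec : pre ++ c :: t ∈ bDfs (pre ++ [c]) m := by
        rcases List.eq_nil_or_concat' t with rfl | _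
        · simpa using self_mem_bDfs m (pre ++ [c]) (by simp)
        · have : (pre ++ [c]) ++ t ∈ bDfs (pre ++ [c]) m := by
            apply ih m (pre ++ [c])
            · rename_i hne; rcases hne with ⟨l, a, rfl⟩; simp
            · simpa using hlen
            · intro x hx; exact hv x (by simp [hx])
          simpa using this
      unfold bDfs
      refine List.mem_append_right _ ?_
      exact List.mem_flatMap.mpr ⟨c, hc, hrec⟩

-- A's rank formula evaluates to the 1-based position for every dictionary entry.
theorem ranked_all :
    ((bDfs [] 5).zipIdx.all (fun p => solCore p.1 == (p.2 : Int) + 1)) = true := by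
  decide

theorem ranked (k : Nat) (hk : k < (bDfs [] 5).length) :
    solCore ((bDfs [] 5)[k]) = (k : Int) + 1 := by
  have hlen : k < (bDfs [] 5).zipIdx.length := by simpa using hk
  have hmem : ((bDfs [] 5)[k], k) ∈ (bDfs [] 5).zipIdx := by
    have := List.getElem_mem hlen
    simpa [List.getElem_zipIdx] using this
  have := List.all_eq_true.mp ranked_all _ hmem
  exact of_decide_eq_true (by simpa using this)

theorem vOrder_nonneg (c : Char) : 0 ≤ vOrder c := by
  unfold vOrder; split_ifs <;> norm_num

theorem sumPow_nonneg (k : Nat) : 0 ≤ sumPow k := by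
  unfold sumPow
  have h : ∀ (l : List Nat) (acc : Int), acc ≤ l.foldl (fun s j => s + 5 ^ j) acc := by
    intro l
    induction l with
    | nil => intro acc; simp
    | cons j t ih =>
      intro acc
      calc acc ≤ acc + 5 ^ j := by
              have : (0 : Int) ≤ 5 ^ j := by positivity
              omega
        _ ≤ _ := by simpa [List.foldl] using ih (acc + 5 ^ j)
  simpa using h (List.range k) 0

theorem aLoop_ge (l : List Char) : ∀ (i : Nat) (acc : Int), acc ≤ aLoop l i acc := by
  induction l with
  | nil => intro i acc; simp [aLoop]
  | cons c t ih =>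
    intro i acc
    unfold aLoop
    by_cases hc : c = ' '
    · simp [hc]
    · simp only [hc, if_false]
      have h1 : acc ≤ acc + sumPow (5 - i) * vOrder c + 1 := by
        have := mul_nonneg (sumPow_nonneg (5 - i)) (vOrder_nonneg c)
        omega
      exact le_trans h1 (ih (i + 1) _)

theorem aLoop_pos (c : Char) (t : List Char) (hc : ¬ (c = ' ')) (i : Nat) :
    1 ≤ aLoop (c :: t) i 0 := by
  unfold aLoop
  simp only [hc, if_false]
  have h1 := aLoop_ge t (i + 1) (0 + sumPow (5 - i) * vOrder c + 1)
  have := mul_nonneg (sumPow_nonneg (5 - i)) (vOrder_nonneg c)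
  omega

theorem alt_zero (word : String)
    (h : word.toList.takeWhile (fun c => c ≠ ' ') ∉ bDfs [] 5) : solution_alt word = 0 := by
  unfold solution_alt
  have hn : PySem.List.index? (bDfs [] 5) (word.toList.takeWhile (fun c => c ≠ ' ')) = none := by
    rw [PySem.List.index?_eq_none_iff]; exact h
  rw [hn]

-- ===== VERDICT (by name: the statement is the Claim_ definition above) =====
theorem solution_spec : Claim_unchanged_solution := by
  intro word _ hpre hnd
  rw [D_iff] at hnd
  have hv : ∀ c ∈ word.toList.takeWhile (fun c => c ≠ ' '), c ∈ vowels := by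
    intro c hc
    exact of_decide_eq_true (List.all_eq_true.mp hpre c hc)
  cases hp : word.toList.takeWhile (fun c => c ≠ ' ') with
  | nil =>
    -- empty prefix: A's loop breaks immediately (0), B finds nothing in the dictionary (0)
    have ha : solution word = 0 := by rw [solution_eq_prefix, hp]; simp [aLoop]
    have hb : solution_alt word = 0 := alt_zero word (by rw [hp]; exact nil_not_mem_dict)
    rw [ha, hb]
  | cons c t =>
    -- non-empty all-vowel prefix of length ≤ 5: it is in the dictionary, and A's formula
    -- computes exactly its 1-based position there
    rw [hp] at hv hnd
    have hmem : (c :: t) ∈ bDfs [] 5 := by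
      simpa using mem_bDfs (c :: t) 5 [] (by simp) (by omega) hv
    have hsome : (PySem.List.index? (bDfs [] 5) (c :: t)).isSome := by
      rw [PySem.List.index?_isSome_iff]; exact hmem
    obtain ⟨k, hk⟩ := Option.isSome_iff_exists.mp hsome
    obtain ⟨hklt, hget, -⟩ := PySem.List.getElem_of_index?_eq_some hk
    have hb : solution_alt word = (k : Int) + 1 := by
      unfold solution_alt; rw [hp, hk]
    have hrank := ranked k hklt
    rw [hget, solCore_eq_noSpace (c :: t) hv] at hrank
    rw [solution_eq_prefix, hp, hb, hrank]

theorem solution_changed : Claim_changed_solution := by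
  unfold Claim_changed_solution; decide

theorem solution_tight : Claim_exact_solution := by
  intro word _ _ hd
  rw [D_iff] at hd
  have hb : solution_alt word = 0 := alt_zero word (not_mem_dict_long _ hd)
  cases hp : word.toList.takeWhile (fun c => c ≠ ' ') with
  | nil => rw [hp] at hd; simp at hd
  | cons c t =>
    have hc : ¬ (c = ' ') := by
      have : c ∈ word.toList.takeWhile (fun c => c ≠ ' ') := by rw [hp]; simp
      have := List.mem_takeWhile_imp this
      simpa using this
    have ha : 1 ≤ solution word := by
      rw [solution_eq_prefix, hp]
      exact aLoop_pos c t hc 0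
    omega
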